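-- pv_equiv track=rewrite | github.com/spkc83/bt-workflow-engine | bt_engine/compiler/step_compilers.py | _infer_extract_keys
-- ===== SOURCE A (Python) =====
-- def _infer_extract_keys(step: dict) -> list[str]:
--     """Infer extraction keys from step context."""
--     required = step.get("required_info", [])
--     # Default extract keys for common patterns
--     base_keys = ["order_id", "merchant_name", "amount", "date", "item_description"]
--
--     if any("complaint" in r for r in required):
--         base_keys.append("complaint_description")
--     if any("alert" in r for r in required):
--         base_keys = ["alert_id"]
--
--     return base_keys
-- ===== SOURCE B (Python) =====
-- _KEY_TABLE = [
--     ["order_id", "merchant_name", "amount", "date", "item_description"],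
--     ["order_id", "merchant_name", "amount", "date", "item_description",
--      "complaint_description"],
--     ["alert_id"],
-- ]
--
--
-- def _severity(r):
--     """Map one required_info entry to a severity score: alert > complaint > none."""
--     if "alert" in r:
--         return 2
--     if "complaint" in r:
--         return 1
--     return 0
--
--
-- def _infer_extract_keys(step: dict) -> list[str]:
--     """Infer extraction keys via the maximal severity of required_info entries."""
--     sev = max((_severity(r) for r in step.get("required_info", [])), default=0)
--     return list(_KEY_TABLE[sev])
-- ===== Notes on version B (the rewrite author's own statement) =====
-- stated objective: alternative
-- what changed: Replaces the two substring scans with append/overwrite mutation by a max-reduction of per-entry severity scores (alert=2, complaint=1, none=0) followed by a lookup in a static table indexed by that severity; alert precedence is encoded by the numeric order instead of branch order.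
import Mathlib
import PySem

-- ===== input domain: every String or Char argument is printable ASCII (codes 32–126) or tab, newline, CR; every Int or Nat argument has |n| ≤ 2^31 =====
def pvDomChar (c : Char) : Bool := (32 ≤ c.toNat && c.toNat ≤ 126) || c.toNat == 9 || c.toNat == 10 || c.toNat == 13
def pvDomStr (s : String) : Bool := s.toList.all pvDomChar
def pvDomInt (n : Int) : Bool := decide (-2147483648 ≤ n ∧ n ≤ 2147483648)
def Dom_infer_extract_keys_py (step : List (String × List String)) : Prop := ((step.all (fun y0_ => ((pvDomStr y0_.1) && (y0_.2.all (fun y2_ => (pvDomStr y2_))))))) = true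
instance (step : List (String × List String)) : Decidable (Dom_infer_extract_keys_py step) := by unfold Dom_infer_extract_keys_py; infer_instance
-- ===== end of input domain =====

-- ===== PORT A =====
-- required = step.get("required_info", []); base_keys; two any() scans; append / overwrite.
def infer_extract_keys_py (step : List (String × List String)) : List String :=
  let required := PySem.Dict.getD (PySem.Dict.mk step) "required_info" []
  let base_keys := ["order_id", "merchant_name", "amount", "date", "item_description"]
  let base_keys := if required.any (fun r => PySem.Str.isIn "complaint" r) then
      base_keys ++ ["complaint_description"] else base_keys
  let base_keys := if required.any (fun r => PySem.Str.isIn "alert" r) then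
      ["alert_id"] else base_keys
  base_keys

-- ===== PORT B =====
-- B: max-reduction of per-entry severity scores, then lookup in a static table.
def pvKeyTable : List (List String) :=
  [["order_id", "merchant_name", "amount", "date", "item_description"],
   ["order_id", "merchant_name", "amount", "date", "item_description",
    "complaint_description"],
   ["alert_id"]]

def pvSeverity (r : String) : Int :=
  if PySem.Str.isIn "alert" r then 2
  else if PySem.Str.isIn "complaint" r then 1
  else 0

def infer_extract_keys_py_alt (step : List (String × List String)) : List String :=
  let sev := (PySem.Dict.getD (PySem.Dict.mk step) "required_info" []).foldl
      (fun m r => max m (pvSeverity r)) 0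
  -- _KEY_TABLE[sev]: sev is always 0, 1 or 2, so the Python indexing never raises;
  -- .getD [] only discharges the Option and is never the value taken.
  (PySem.List.pyGet? pvKeyTable sev).getD []

-- ===== PRECONDITION & SPEC =====
def Spec_infer_extract_keys_py (step : List (String × List String)) (out : List String) : Prop := out = infer_extract_keys_py_alt step
instance (step : List (String × List String)) (out : List String) : Decidable (Spec_infer_extract_keys_py step out) := by unfold Spec_infer_extract_keys_py; infer_instance

-- ===== CLAIM (what is proved, stated in full; the proofs are below) =====
def Claim_equal_infer_extract_keys_py : Prop := ∀ (step : List (String × List String)), Dom_infer_extract_keys_py step → Spec_infer_extract_keys_py step (infer_extract_keys_py step)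

-- ===== LEMMAS AND PROOFS =====

-- ===== VERDICT (by name: the statement is the Claim_ definition above) =====
lemma sev_foldl (l : List String) (m : Int) (hm : 0 ≤ m) :
    l.foldl (fun m r => max m (pvSeverity r)) m
      = max m (if l.any (fun r => PySem.Str.isIn "alert" r) then 2
               else if l.any (fun r => PySem.Str.isIn "complaint" r) then 1 else 0) := by
  induction l generalizing m with
  | nil => simp; omega
  | cons x xs ih =>
    simp only [List.foldl_cons, List.any_cons]
    rw [ih (max m (pvSeverity x)) (by unfold pvSeverity; split_ifs <;> omega)]
    by_cases hA : PySem.Str.isIn "alert" x = true <;>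
      by_cases hC : PySem.Str.isIn "complaint" x = true <;>
      by_cases hA2 : (xs.any fun r => PySem.Str.isIn "alert" r) = true <;>
      by_cases hC2 : (xs.any fun r => PySem.Str.isIn "complaint" r) = true <;>
      simp only [pvSeverity, hA, hC, hA2, hC2, Bool.not_eq_true] at * <;>
      simp

theorem infer_extract_keys_py_spec : Claim_equal_infer_extract_keys_py := by
  intro step _
  unfold Spec_infer_extract_keys_py infer_extract_keys_py infer_extract_keys_py_alt
  rw [sev_foldl _ 0 le_rfl]
  by_cases hA : (((PySem.Dict.mk step).getD "required_info" []).any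
      (fun r => PySem.Str.isIn "alert" r)) = true <;>
    by_cases hC : (((PySem.Dict.mk step).getD "required_info" []).any
      (fun r => PySem.Str.isIn "complaint" r)) = true <;>
    simp only [hA, hC, Bool.not_eq_true] at * <;>
    simp [pvKeyTable, PySem.List.pyGet?, PySem.List.pyIdx?]
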